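-- pv_equiv track=rewrite | github.com/anilreddysbs/sql-validator | validator/rules/column_naming_rule.py | _split_by_comma_ignoring_parens
-- ===== SOURCE A (Python) =====
-- def _split_by_comma_ignoring_parens(text):
--     """Helper to split SQL definitions by comma, ignoring commas inside parentheses."""
--     parts = []
--     current = []
--     depth = 0
--     for char in text:
--         if char == '(':
--             depth += 1
--         elif char == ')':
--             depth -= 1
--
--         if char == ',' and depth == 0:
--             parts.append("".join(current))
--             current = []
--         else:
--             current.append(char)
--     if current:
--         parts.append("".join(current))
--     return parts
-- ===== SOURCE B (Python) =====
-- def _first_top_level_comma(s):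
--     """Index of the first comma at parenthesis depth 0, or None."""
--     depth = 0
--     for i, ch in enumerate(s):
--         if ch == '(':
--             depth += 1
--         elif ch == ')':
--             depth -= 1
--         elif ch == ',' and depth == 0:
--             return i
--     return None
--
--
-- def _split_by_comma_ignoring_parens(text):
--     """Split SQL definitions by top-level commas by repeatedly cutting the
--     text at the first top-level comma of the remainder."""
--     parts = []
--     rest = text
--     while True:
--         cut = _first_top_level_comma(rest)
--         if cut is None:
--             break
--         parts.append(rest[:cut])
--         rest = rest[cut + 1:]
--     if rest:
--         parts.append(rest)
--     return parts
-- ===== Notes on version B (the rewrite author's own statement) =====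
-- stated objective: alternative
-- what changed: Instead of one accumulator pass that builds each part character by character, B repeatedly finds the index of the first top-level comma in the remainder and slices the string there, appending whole slices.
import Mathlib
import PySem

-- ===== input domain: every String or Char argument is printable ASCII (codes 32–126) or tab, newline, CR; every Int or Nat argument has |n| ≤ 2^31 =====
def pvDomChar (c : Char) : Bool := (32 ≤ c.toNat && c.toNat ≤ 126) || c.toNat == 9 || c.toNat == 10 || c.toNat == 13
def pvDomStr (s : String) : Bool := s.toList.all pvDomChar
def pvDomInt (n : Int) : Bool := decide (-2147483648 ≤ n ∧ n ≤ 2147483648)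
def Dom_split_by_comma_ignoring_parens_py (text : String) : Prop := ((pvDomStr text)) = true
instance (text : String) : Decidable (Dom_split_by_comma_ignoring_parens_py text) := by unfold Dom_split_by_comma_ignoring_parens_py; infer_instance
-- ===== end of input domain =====

-- B replaces A's character-accumulator pass by repeated cut-at-first-top-level-comma slicing (alternative decomposition, same cost).

-- ===== PORT A =====
-- one loop iteration of A: update depth, then either close the current part at a top-level comma or append the char
def pyStep (st : List String × List Char × Int) (c : Char) : List String × List Char × Int :=
  let parts := st.1
  let cur := st.2.1
  let depth0 := st.2.2
  let depth := if c = '(' then depth0 + 1 else if c = ')' then depth0 - 1 else depth0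
  if c = ',' ∧ depth = 0 then (parts ++ [String.mk cur], [], depth)
  else (parts, cur ++ [c], depth)

def split_by_comma_ignoring_parens_py (text : String) : List String :=
  let st := text.toList.foldl pyStep ([], [], (0 : Int))
  if st.2.1 ≠ [] then st.1 ++ [String.mk st.2.1] else st.1

-- ===== PORT B =====
-- _first_top_level_comma: enumerate with a running index, tracking depth exactly as A does
def findCut (depth : Int) (i : Nat) (s : List Char) : Option Nat :=
  match s with
  | [] => none
  | c :: rest =>
    if c = '(' then findCut (depth + 1) (i + 1) rest
    else if c = ')' then findCut (depth - 1) (i + 1) rest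
    else if c = ',' ∧ depth = 0 then some i
    else findCut depth (i + 1) rest

-- findCut never reports a cut on the empty remainder (needed for the while loop's termination)
theorem findCut_nil (depth : Int) (i : Nat) : findCut depth i [] = none := rfl

-- the while loop of B: cut at the first top-level comma, slice (rest[:cut] = take, rest[cut+1:] = drop; cut is in range), repeat
def altGo (parts : List (List Char)) (rest : List Char) : List (List Char) :=
  match h : findCut 0 0 rest with
  | some cut => altGo (parts ++ [rest.take cut]) (rest.drop (cut + 1))
  | none => if rest ≠ [] then parts ++ [rest] else parts
termination_by rest.length
decreasing_by
  cases rest with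
  | nil => simp [findCut_nil] at h
  | cons c t => simp only [List.length_drop, List.length_cons]; omega

def split_by_comma_ignoring_parens_py_alt (text : String) : List String :=
  (altGo [] text.toList).map String.mk

-- ===== PRECONDITION & SPEC =====
def Spec_split_by_comma_ignoring_parens_py (text : String) (out : List String) : Prop := out = split_by_comma_ignoring_parens_py_alt text
instance (text : String) (out : List String) : Decidable (Spec_split_by_comma_ignoring_parens_py text out) := by unfold Spec_split_by_comma_ignoring_parens_py; infer_instance

-- ===== CLAIM (what is proved, stated in full; the proofs are below) =====
def Claim_equal_split_by_comma_ignoring_parens_py : Prop := ∀ (text : String), Dom_split_by_comma_ignoring_parens_py text → Spec_split_by_comma_ignoring_parens_py text (split_by_comma_ignoring_parens_py text)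

-- ===== LEMMAS AND PROOFS =====

-- characterization of A's loop as a structural recursion carrying (cur, depth)
def finish (cur : List Char) (depth : Int) (cs : List Char) : List (List Char) :=
  match cs with
  | [] => if cur ≠ [] then [cur] else []
  | c :: rest =>
    let d := if c = '(' then depth + 1 else if c = ')' then depth - 1 else depth
    if c = ',' ∧ d = 0 then cur :: finish [] 0 rest
    else finish (cur ++ [c]) d rest

-- A's fold (plus its final flush) equals parts ++ finish cur depth cs
theorem foldA_eq (cs : List Char) : ∀ (parts : List String) (cur : List Char) (depth : Int),
    (let st := cs.foldl pyStep (parts, cur, depth)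
     if st.2.1 ≠ [] then st.1 ++ [String.mk st.2.1] else st.1)
    = parts ++ (finish cur depth cs).map String.mk := by
  induction cs with
  | nil =>
    intro parts cur depth
    by_cases h : cur = [] <;> simp [finish, h]
  | cons c rest ih =>
    intro parts cur depth
    simp only [List.foldl_cons]
    by_cases h : c = ',' ∧ (if c = '(' then depth + 1 else if c = ')' then depth - 1 else depth) = 0
    · have hstep : pyStep (parts, cur, depth) c
          = (parts ++ [String.mk cur], ([] : List Char), (0 : Int)) := by
        simp only [pyStep]; rw [if_pos h, h.2]
      rw [hstep, ih]
      simp only [finish]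
      rw [if_pos h]
      simp [List.append_assoc]
    · have hstep : pyStep (parts, cur, depth) c
          = (parts, cur ++ [c],
             (if c = '(' then depth + 1 else if c = ')' then depth - 1 else depth)) := by
        simp only [pyStep]; rw [if_neg h]
      rw [hstep, ih]
      simp only [finish]
      rw [if_neg h]

-- the index parameter of findCut only shifts the reported position
theorem findCut_shift (s : List Char) : ∀ (depth : Int) (i : Nat),
    findCut depth i s = (findCut depth 0 s).map (· + i) := by
  induction s with
  | nil => intro depth i; simp [findCut]
  | cons c rest ih =>
    intro depth i
    simp only [findCut]
    split_ifs with h1 h2 h3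
    · rw [ih _ (i + 1), ih _ 1, Option.map_map]
      congr 1; funext x; simp; omega
    · rw [ih _ (i + 1), ih _ 1, Option.map_map]
      congr 1; funext x; simp; omega
    · simp
    · rw [ih _ (i + 1), ih _ 1, Option.map_map]
      congr 1; funext x; simp; omega

-- one non-splitting character: both sides of finish_eq_cut advance together
theorem finish_cut_step (c : Char) (rest cur : List Char) (depth d : Int)
    (hfin : finish cur depth (c :: rest) = finish (cur ++ [c]) d rest)
    (hcut : findCut depth 0 (c :: rest) = (findCut d 0 rest).map (· + 1))
    (ih : finish (cur ++ [c]) d rest =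
      match findCut d 0 rest with
      | some cut => ((cur ++ [c]) ++ rest.take cut) :: finish [] 0 (rest.drop (cut + 1))
      | none => if (cur ++ [c]) ++ rest ≠ [] then [(cur ++ [c]) ++ rest] else []) :
    finish cur depth (c :: rest) =
      match findCut depth 0 (c :: rest) with
      | some cut => (cur ++ (c :: rest).take cut) :: finish [] 0 ((c :: rest).drop (cut + 1))
      | none => if cur ++ c :: rest ≠ [] then [cur ++ c :: rest] else [] := by
  rw [hfin, ih, hcut]
  cases hfc : findCut d 0 rest with
  | none => simp
  | some cut => simp [List.take_succ_cons, List.drop_succ_cons]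

-- finish is computed by cutting at the first top-level comma that findCut finds
theorem finish_eq_cut (cs : List Char) : ∀ (cur : List Char) (depth : Int),
    finish cur depth cs =
      match findCut depth 0 cs with
      | some cut => (cur ++ cs.take cut) :: finish [] 0 (cs.drop (cut + 1))
      | none => if cur ++ cs ≠ [] then [cur ++ cs] else [] := by
  induction cs with
  | nil => intro cur depth; simp [finish, findCut]
  | cons c rest ih =>
    intro cur depth
    by_cases h1 : c = '('
    · have hne : ¬ (c = ',' ∧ (if c = '(' then depth + 1 else if c = ')' then depth - 1 else depth) = 0) := by
        intro hx; rw [hx.1] at h1; exact absurd h1 (by decide)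
      refine finish_cut_step c rest cur depth (depth + 1) ?_ ?_ (ih _ _)
      · simp only [finish]; rw [if_neg hne]; simp [h1]
      · simp only [findCut]; rw [if_pos h1, findCut_shift]
    · by_cases h2 : c = ')'
      · have hne : ¬ (c = ',' ∧ (if c = '(' then depth + 1 else if c = ')' then depth - 1 else depth) = 0) := by
          intro hx; rw [hx.1] at h2; exact absurd h2 (by decide)
        refine finish_cut_step c rest cur depth (depth - 1) ?_ ?_ (ih _ _)
        · simp only [finish]; rw [if_neg hne]; simp [h1, h2]
        · simp only [findCut]; rw [if_neg h1, if_pos h2, findCut_shift]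
      · have hd : (if c = '(' then depth + 1 else if c = ')' then depth - 1 else depth) = depth := by
          simp [h1, h2]
        by_cases h3 : c = ',' ∧ depth = 0
        · have : finish cur depth (c :: rest) = cur :: finish [] 0 rest := by
            simp only [finish]; rw [hd, if_pos h3]
          rw [this]
          have hcut : findCut depth 0 (c :: rest) = some 0 := by
            simp only [findCut]; rw [if_neg h1, if_neg h2, if_pos h3]
          simp [hcut]
        · have hne : ¬ (c = ',' ∧ (if c = '(' then depth + 1 else if c = ')' then depth - 1 else depth) = 0) := by
            rw [hd]; exact h3
          refine finish_cut_step c rest cur depth depth ?_ ?_ (ih _ _)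
          · simp only [finish]; rw [if_neg hne, hd]
          · simp only [findCut]; rw [if_neg h1, if_neg h2, if_neg h3, findCut_shift]

-- B's while loop computes parts ++ finish [] 0 rest
theorem altGo_eq (n : Nat) : ∀ (rest : List Char), rest.length ≤ n → ∀ (parts : List (List Char)),
    altGo parts rest = parts ++ finish [] 0 rest := by
  induction n with
  | zero =>
    intro rest hlen parts
    have hnil : rest = [] := List.eq_nil_of_length_eq_zero (Nat.le_zero.mp hlen)
    subst hnil
    rw [altGo]
    split
    · next cut heq => simp [findCut] at heq
    · next => simp [finish]
  | succ n ihn =>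
    intro rest hlen parts
    rw [altGo]
    split
    · next cut heq =>
      have hne : rest ≠ [] := by intro hx; subst hx; simp [findCut] at heq
      have hlt : (rest.drop (cut + 1)).length ≤ n := by
        have : 0 < rest.length := List.length_pos_of_ne_nil hne
        simp only [List.length_drop]; omega
      rw [ihn _ hlt, finish_eq_cut rest [] 0]
      simp only [heq]
      simp [List.append_assoc]
    · next heq =>
      rw [finish_eq_cut]
      simp only [heq]
      by_cases hr : rest = [] <;> simp [hr]

-- ===== VERDICT (by name: the statement is the Claim_ definition above) =====
theorem split_by_comma_ignoring_parens_py_spec : Claim_equal_split_by_comma_ignoring_parens_py := by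
  intro text _
  unfold Spec_split_by_comma_ignoring_parens_py split_by_comma_ignoring_parens_py split_by_comma_ignoring_parens_py_alt
  rw [altGo_eq text.toList.length text.toList le_rfl []]
  simpa using foldA_eq text.toList [] [] 0
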